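-- pv_equiv track=rewrite | github.com/aconconi/advent-of-code-2020 | aoc2020_day17.py | solve
-- ===== SOURCE A (Python) =====
-- from itertools import product, repeat
--
-- def neighbors(pos):
--     for delta in product((-1, 0, +1), repeat=len(pos)):
--         if any (d for d in delta):
--             yield tuple(p + d for (p, d) in zip(pos, delta))
--
-- def bounding_box(nodes):
--     box = (range(min(axis) - 1, max(axis) + 2) for axis in zip(*nodes))
--     yield from product(*box)
--
-- def solve(active):
--     for _ in range(6):
--         new_active = set()
--         for pos in bounding_box(active):
--             score = len(active & set(neighbors(pos)))
--             if pos in active and score in (2, 3):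
--                 new_active.add(pos)
--             else:
--                 if score == 3:
--                     new_active.add(pos)
--
--         active = new_active
--
--     return len(active)
-- ===== SOURCE B (Python) =====
-- def _cube(pos):
--     # all cells whose every coordinate differs from pos by at most 1 (including pos itself)
--     if not pos:
--         return [()]
--     head = pos[0]
--     rest = _cube(pos[1:])
--     return [(q,) + t for q in (head - 1, head, head + 1) for t in rest]
--
--
-- def _adjacent(pos):
--     return [c for c in _cube(pos) if c != pos]
--
--
-- def solve(active):
--     cells = set(active)
--     for _ in range(6):
--         counts = {}
--         for cell in cells:
--             for nb in _adjacent(cell):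
--                 counts[nb] = counts.get(nb, 0) + 1
--         cells = {p for p, k in counts.items() if k == 3 or (k == 2 and p in cells)}
--     return len(cells)
-- ===== Notes on version B (the rewrite author's own statement) =====
-- stated objective: faster
-- what changed: A scans every cell of the bounding box (volume >= 3^d regardless of sparsity) each generation and intersects the active set with each cell's neighbours; B builds a neighbour-count dictionary by iterating over the active cells only and applies the birth/survival rules to its entries. …
-- outside the precondition, e.g. on solve({(0, 1), (0, 0), (1, 1), (1, 0), (9,)}): A returns 0, B returns 4
import Mathlib
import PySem

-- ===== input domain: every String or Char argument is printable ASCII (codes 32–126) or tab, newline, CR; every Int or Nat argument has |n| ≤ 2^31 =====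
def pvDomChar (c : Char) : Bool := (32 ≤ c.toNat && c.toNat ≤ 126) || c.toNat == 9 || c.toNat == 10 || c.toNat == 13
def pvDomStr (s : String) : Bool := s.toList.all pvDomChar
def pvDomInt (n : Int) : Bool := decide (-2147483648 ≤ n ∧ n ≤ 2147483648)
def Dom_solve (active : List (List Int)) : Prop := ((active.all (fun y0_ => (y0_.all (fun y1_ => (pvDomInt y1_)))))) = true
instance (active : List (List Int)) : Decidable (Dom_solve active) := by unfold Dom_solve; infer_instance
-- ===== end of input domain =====

-- B replaces A's scan of the whole bounding box (volume ≥ 3^d cells per generation) by a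
-- neighbour-count dictionary built from the active cells only; intended as faster (work on
-- the active cells instead of the whole box): a timing run saw A time out at n=16 where
-- B returned, but could not measure a ratio, so 'faster' is unconfirmed in a timing run.
-- A mutates nothing observable; the equivalence is about the return value.

-- ===== PORT A =====
-- itertools.product((-1,0,+1), repeat=n)
def pyDeltas : Nat → List (List Int)
  | 0 => [[]]
  | n + 1 => ([-1, 0, 1] : List Int).flatMap (fun x => (pyDeltas n).map (fun t => x :: t))

-- neighbors(pos)
def neighborsA (pos : List Int) : List (List Int) :=
  ((pyDeltas pos.length).filter (fun δ => δ.any (fun d => d != 0))).map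
    (fun δ => (pos.zip δ).map (fun pd => pd.1 + pd.2))

-- termination helpers for zipStar (cited by its decreasing_by)
theorem pvSumLenTailLe (rows : List (List Int)) :
    ((rows.map List.tail).map List.length).sum ≤ (rows.map List.length).sum := by
  induction rows with
  | nil => simp
  | cons r rs ih =>
      simp only [List.map_cons, List.sum_cons]
      have : r.tail.length ≤ r.length := by
        cases r <;> simp
      omega

theorem pvSumLenTailLt (rows : List (List Int)) (hne : rows ≠ [])
    (h : ∀ r ∈ rows, r.isEmpty = false) :
    ((rows.map List.tail).map List.length).sum < (rows.map List.length).sum := by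
  cases rows with
  | nil => exact absurd rfl hne
  | cons r rs =>
      simp only [List.map_cons, List.sum_cons]
      have hr : r.isEmpty = false := h r (by simp)
      have hlt : r.tail.length < r.length := by
        cases r with
        | nil => simp at hr
        | cons a t => simp
      have := pvSumLenTailLe rs
      omega

-- zip(*nodes): columns until some row runs out
def zipStar (rows : List (List Int)) : List (List Int) :=
  if h : rows = [] ∨ rows.any (fun r => r.isEmpty) then []
  else (rows.map (fun r => r.headD 0)) :: zipStar (rows.map (fun r => r.tail))
termination_by (rows.map List.length).sum
decreasing_by
  have ha : List.map (fun x : {x // x ∈ rows} => (x : List Int).tail) rows.attach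
      = List.map List.tail rows := by
    rw [show (fun x : {x // x ∈ rows} => (x : List Int).tail) = List.tail ∘ Subtype.val from rfl,
      ← List.map_map, List.attach_map_subtype_val]
  rw [ha]
  refine pvSumLenTailLt rows (fun he => h (Or.inl he)) ?_
  intro r hr
  by_contra hc
  exact h (Or.inr (List.any_eq_true.mpr ⟨r, hr, by simpa using hc⟩))

-- itertools.product(*box)
def prodA : List (List Int) → List (List Int)
  | [] => [[]]
  | ax :: rest => ax.flatMap (fun v => (prodA rest).map (fun t => v :: t))

-- bounding_box(nodes)
def boundingBoxA (nodes : List (List Int)) : List (List Int) :=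
  prodA ((zipStar nodes).map (fun ax =>
    PySem.List.pyRange ((PySem.List.min? ax (fun y => y)).getD 0 - 1)
                       ((PySem.List.max? ax (fun y => y)).getD 0 + 2) 1))

-- one generation of A's loop body
def stepA (active : List (List Int)) : List (List Int) :=
  (boundingBoxA active).foldl
    (fun newActive pos =>
      let score := (PySem.Set.inter active (PySem.Set.ofList (neighborsA pos))).length
      if pos ∈ active ∧ (score = 2 ∨ score = 3) then PySem.Set.add newActive pos
      else if score = 3 then PySem.Set.add newActive pos
      else newActive)
    PySem.Set.empty

def solve (active : List (List Int)) : Int :=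
  PySem.Set.len ((List.range 6).foldl (fun act _ => stepA act) active)

-- ===== PORT B =====
-- _cube(pos): all cells within coordinate distance ≤ 1, including pos
def cubeB : List Int → List (List Int)
  | [] => [[]]
  | p :: rest => ([p - 1, p, p + 1] : List Int).flatMap (fun q => (cubeB rest).map (fun t => q :: t))

-- _adjacent(pos)
def adjacentB (pos : List Int) : List (List Int) :=
  (cubeB pos).filter (fun c => c != pos)

-- one generation of B's loop body
def stepB (cells : List (List Int)) : List (List Int) :=
  let counts := cells.foldl
    (fun d cell => (adjacentB cell).foldl (fun d nb => d.insert nb (d.getD nb 0 + 1)) d)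
    (PySem.Dict.empty : PySem.Dict (List Int) Int)
  PySem.Set.ofList ((counts.items.filter
      (fun pk => pk.2 == 3 || (pk.2 == 2 && cells.contains pk.1))).map (fun pk => pk.1))

def solve_alt (active : List (List Int)) : Int :=
  PySem.Set.len ((List.range 6).foldl (fun cs _ => stepB cs) (PySem.Set.ofList active))

-- ===== PRECONDITION & SPEC =====
-- helpers for Pre_ (independent of both ports): the minimal cell dimension, cell adjacency,
-- and three equal-dimension cells crowding a common position (coordinatewise spread ≤ 2)
def pvMinLenI (active : List (List Int)) : Int :=
  (PySem.List.min? (active.map (fun c => (c.length : Int))) (fun y => y)).getD 0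

def pvAdjB (d p : List Int) : Bool :=
  d.length == p.length && d != p &&
    (List.range d.length).all (fun j =>
      decide (d.getD j 0 - 1 ≤ p.getD j 0 ∧ p.getD j 0 ≤ d.getD j 0 + 1))

def pvClose3 (c1 c2 c3 : List Int) : Bool :=
  (List.range c1.length).all (fun j =>
    decide ((c1.getD j 0 - c2.getD j 0 ≤ 2 ∧ c2.getD j 0 - c1.getD j 0 ≤ 2) ∧
            (c1.getD j 0 - c3.getD j 0 ≤ 2 ∧ c3.getD j 0 - c1.getD j 0 ≤ 2) ∧
            (c2.getD j 0 - c3.getD j 0 ≤ 2 ∧ c3.getD j 0 - c2.getD j 0 ≤ 2)))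

-- Pre_ excludes lists with duplicate rows (the convention encodes Python's set argument as the
-- list of its DISTINCT elements, so a duplicate-carrying list encodes no set input) and
-- mixed-dimension sets in which some cell of non-minimal dimension is not immediately doomed
-- (it has two or more adjacent same-dimension cells, or three same-dimension cells crowd a
-- common position): A's zip-truncation silently drops all such cells, which is accidental,
-- while B simulates them; on every other input the two agree exactly.
def Pre_solve (active : List (List Int)) : Prop :=
  active.Nodup ∧
  (∀ c ∈ active, (c.length : Int) ≠ pvMinLenI active →
      active.countP (fun d => pvAdjB d c) < 2) ∧
  (∀ c1 ∈ active, ∀ c2 ∈ active, ∀ c3 ∈ active,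
      (c1.length : Int) ≠ pvMinLenI active → c1 ≠ c2 → c1 ≠ c3 → c2 ≠ c3 →
      c1.length = c2.length → c1.length = c3.length → ¬ pvClose3 c1 c2 c3 = true)
instance (active : List (List Int)) : Decidable (Pre_solve active) := by unfold Pre_solve; infer_instance

def pvWitness_solve : List (List Int) := [[0, 0, 0], [1, 0, 0], [2, 0, 0]]

def Spec_solve (active : List (List Int)) (out : Int) : Prop := out = solve_alt active
instance (active : List (List Int)) (out : Int) : Decidable (Spec_solve active out) := by unfold Spec_solve; infer_instance

-- ===== CLAIM (what is proved, stated in full; the proofs are below) =====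
def Claim_equal_solve : Prop := ∀ (active : List (List Int)), Dom_solve active → Pre_solve active → Spec_solve active (solve active)

-- ===== LEMMAS AND PROOFS =====

-- the coordinate-adjacency relation shared by both neighbour generators
def pvNear (p q : Int) : Prop := q = p - 1 ∨ q = p ∨ q = p + 1

theorem mem_prodA (rs : List (List Int)) (x : List Int) :
    x ∈ prodA rs ↔ List.Forall₂ (fun ax v => v ∈ ax) rs x := by
  induction rs generalizing x with
  | nil => simp [prodA, List.forall₂_nil_left_iff]
  | cons ax rest ih =>
      simp only [prodA, List.mem_flatMap, List.mem_map, List.forall₂_cons_left_iff]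
      constructor
      · rintro ⟨v, hv, t, ht, rfl⟩
        exact ⟨v, t, hv, (ih t).1 ht, rfl⟩
      · rintro ⟨v, t, hv, ht, rfl⟩
        exact ⟨v, hv, t, (ih t).2 ht, rfl⟩

theorem mem_cubeB (pos x : List Int) :
    x ∈ cubeB pos ↔ List.Forall₂ pvNear pos x := by
  induction pos generalizing x with
  | nil => simp [cubeB, List.forall₂_nil_left_iff]
  | cons p rest ih =>
      simp only [cubeB, List.mem_flatMap, List.mem_map, List.forall₂_cons_left_iff, List.mem_cons,
        List.mem_singleton, List.not_mem_nil, or_false]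
      constructor
      · rintro ⟨q, hq, t, ht, rfl⟩
        exact ⟨q, t, by unfold pvNear; tauto, (ih t).1 ht, rfl⟩
      · rintro ⟨q, t, hq, ht, rfl⟩
        exact ⟨q, by unfold pvNear at hq; tauto, t, (ih t).2 ht, rfl⟩

theorem nodup_cubeB (pos : List Int) : (cubeB pos).Nodup := by
  induction pos with
  | nil => simp [cubeB]
  | cons p rest ih =>
      unfold cubeB
      rw [List.nodup_flatMap]
      refine ⟨fun q _ => ih.map ?_, ?_⟩
      · intro a b h
        simpa using h
      · have hthis : ∀ (a b : Int), a ≠ b →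
            Function.onFun List.Disjoint (fun q => (cubeB rest).map (fun t => q :: t)) a b := by
          intro a b hab x hxa hxb
          simp only [List.mem_map] at hxa hxb
          obtain ⟨t, _, rfl⟩ := hxa
          obtain ⟨t', _, he⟩ := hxb
          exact hab (List.cons.injEq .. ▸ he).1.symm
        have hne : ([p - 1, p, p + 1] : List Int).Pairwise (· ≠ ·) := by
          refine List.Pairwise.cons ?_ (List.Pairwise.cons ?_ (List.Pairwise.cons ?_ List.Pairwise.nil))
          · intro b hb
            simp only [List.mem_cons, List.not_mem_nil, or_false] at hb
            rcases hb with rfl | rfl <;> omega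
          · intro b hb
            simp only [List.mem_cons, List.not_mem_nil, or_false] at hb
            rcases hb with rfl <;> omega
          · intro b hb
            exact absurd hb (List.not_mem_nil)
        exact hne.imp (fun hab => hthis _ _ hab)

theorem mem_adjacentB (pos x : List Int) :
    x ∈ adjacentB pos ↔ List.Forall₂ pvNear pos x ∧ x ≠ pos := by
  simp [adjacentB, List.mem_filter, mem_cubeB]

theorem mem_pyDeltas (n : Nat) (δ : List Int) :
    δ ∈ pyDeltas n ↔ δ.length = n ∧ ∀ d ∈ δ, d = -1 ∨ d = 0 ∨ d = 1 := by
  induction n generalizing δ with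
  | zero =>
      simp only [pyDeltas, List.mem_singleton]
      constructor
      · rintro rfl; simp
      · rintro ⟨h, -⟩; exact List.eq_nil_of_length_eq_zero h
  | succ n ih =>
      simp only [pyDeltas, List.mem_flatMap, List.mem_map, List.mem_cons, List.not_mem_nil, or_false]
      constructor
      · rintro ⟨x, hx, t, ht, rfl⟩
        obtain ⟨hlen, hall⟩ := (ih t).1 ht
        refine ⟨by simp [hlen], ?_⟩
        intro d hd
        rcases List.mem_cons.1 hd with rfl | hd
        · tauto
        · exact hall d hd
      · rintro ⟨hlen, hall⟩
        cases δ with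
        | nil => simp at hlen
        | cons x t =>
            refine ⟨x, ?_, t, (ih t).2 ⟨by simpa using hlen, fun d hd => hall d (List.mem_cons_of_mem _ hd)⟩, rfl⟩
            have := hall x (List.mem_cons_self)
            tauto

theorem pvZipWithAdd_near (pos δ : List Int) (h : δ.length = pos.length)
    (hs : ∀ d ∈ δ, d = -1 ∨ d = 0 ∨ d = 1) :
    List.Forall₂ pvNear pos (List.zipWith (· + ·) pos δ) := by
  induction pos generalizing δ with
  | nil => simp
  | cons p rest ih =>
      cases δ with
      | nil => simp at h
      | cons d t =>
          refine List.Forall₂.cons ?_ (ih t (by simpa using h) (fun x hx => hs x (List.mem_cons_of_mem _ hx)))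
          have hd3 := hs d (List.mem_cons_self)
          rcases hd3 with rfl | rfl | rfl <;> simp [pvNear] <;> omega

theorem pvZipWithAdd_eq_self (pos δ : List Int) (h : δ.length = pos.length) :
    List.zipWith (· + ·) pos δ = pos ↔ ∀ d ∈ δ, d = 0 := by
  induction pos generalizing δ with
  | nil =>
      cases δ with
      | nil => simp
      | cons d t => simp at h
  | cons p rest ih =>
      cases δ with
      | nil => simp at h
      | cons d t =>
          simp only [List.zipWith_cons_cons, List.cons.injEq, List.mem_cons, forall_eq_or_imp]
          rw [ih t (by simpa using h)]
          constructor
          · rintro ⟨h1, h2⟩; exact ⟨by omega, h2⟩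
          · rintro ⟨rfl, h2⟩; exact ⟨by omega, h2⟩

theorem pvDelta_of_near (pos r : List Int) (hf : List.Forall₂ pvNear pos r) :
    ∃ δ : List Int, δ.length = pos.length ∧ (∀ d ∈ δ, d = -1 ∨ d = 0 ∨ d = 1) ∧
      r = List.zipWith (· + ·) pos δ := by
  induction hf with
  | nil => exact ⟨[], rfl, by simp⟩
  | @cons p q posT rT hpq _ ihr =>
      obtain ⟨δ, hlen, hsmall, rfl⟩ := ihr
      refine ⟨(q - p) :: δ, by simp [hlen], ?_, ?_⟩
      · intro d hd
        rcases List.mem_cons.1 hd with rfl | hd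
        · unfold pvNear at hpq; omega
        · exact hsmall d hd
      · simp only [List.zipWith_cons_cons, List.cons.injEq]
        exact ⟨by omega, by trivial⟩

theorem mem_neighborsA (pos r : List Int) :
    r ∈ neighborsA pos ↔ List.Forall₂ pvNear pos r ∧ r ≠ pos := by
  have hzip : ∀ δ : List Int, (pos.zip δ).map (fun pd => pd.1 + pd.2) = List.zipWith (· + ·) pos δ := by
    intro δ
    exact List.map_uncurry_zip_eq_zipWith
  simp only [neighborsA, List.mem_map, List.mem_filter, mem_pyDeltas, hzip]
  constructor
  · rintro ⟨δ, ⟨⟨hlen, hsmall⟩, hany⟩, rfl⟩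
    refine ⟨pvZipWithAdd_near pos δ hlen hsmall, ?_⟩
    intro he
    rw [pvZipWithAdd_eq_self pos δ hlen] at he
    simp only [List.any_eq_true, bne_iff_ne, ne_eq] at hany
    obtain ⟨d, hd, hdne⟩ := hany
    exact hdne (he d hd)
  · rintro ⟨hf, hne⟩
    obtain ⟨δ, hlen, hsmall, rfl⟩ := pvDelta_of_near pos r hf
    refine ⟨δ, ⟨⟨hlen, hsmall⟩, ?_⟩, rfl⟩
    simp only [List.any_eq_true, bne_iff_ne, ne_eq]
    by_contra hc
    push_neg at hc
    exact hne ((pvZipWithAdd_eq_self pos δ hlen).2 hc)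

theorem pvNear_symm (pos r : List Int) :
    List.Forall₂ pvNear pos r ↔ List.Forall₂ pvNear r pos := by
  have h : ∀ (a b : List Int), List.Forall₂ pvNear a b → List.Forall₂ pvNear b a := by
    intro a b hab
    induction hab with
    | nil => exact List.Forall₂.nil
    | cons h _ ihr => exact List.Forall₂.cons (by unfold pvNear at *; omega) ihr
  exact ⟨h pos r, h r pos⟩

theorem pvTailGetD (r : List Int) (j : Nat) : r.tail.getD j 0 = r.getD (j + 1) 0 := by
  cases r <;> simp [List.getD]

theorem zipStar_eq (m : Nat) (rows : List (List Int)) (hne : rows ≠ [])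
    (h1 : ∀ r ∈ rows, m ≤ r.length) (h2 : ∃ r ∈ rows, r.length = m) :
    zipStar rows = (List.range m).map (fun j => rows.map (fun r => r.getD j 0)) := by
  induction m generalizing rows with
  | zero =>
      obtain ⟨r, hr, hrlen⟩ := h2
      rw [zipStar.eq_def]
      have : rows.any (fun r => r.isEmpty) = true := by
        refine List.any_eq_true.mpr ⟨r, hr, ?_⟩
        simpa [List.isEmpty_iff] using List.eq_nil_of_length_eq_zero hrlen
      simp [this]
  | succ m ih =>
      have hnonempty : ∀ r ∈ rows, r.isEmpty = false := by
        intro r hr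
        have := h1 r hr
        cases r
        · simp at this
        · simp
      rw [zipStar.eq_def]
      have hcond : ¬(rows = [] ∨ rows.any (fun r => r.isEmpty) = true) := by
        rintro (rfl | hany)
        · exact hne rfl
        · obtain ⟨r, hr, hre⟩ := List.any_eq_true.1 hany
          rw [hnonempty r hr] at hre
          exact Bool.false_ne_true hre
      rw [dif_neg hcond]
      have htails : zipStar (rows.map (fun r => r.tail))
          = (List.range m).map (fun j => (rows.map (fun r => r.tail)).map (fun r => r.getD j 0)) := by
        refine ih (rows.map (fun r => r.tail)) (by simpa using hne) ?_ ?_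
        · intro r hr
          obtain ⟨r0, hr0, rfl⟩ := List.mem_map.1 hr
          have := h1 r0 hr0
          simp only [List.length_tail]
          omega
        · obtain ⟨r0, hr0, hr0len⟩ := h2
          exact ⟨r0.tail, List.mem_map_of_mem hr0, by simp [List.length_tail, hr0len]⟩
      rw [htails, List.range_succ_eq_map]
      simp only [List.map_cons, List.map_map]
      congr 1
      · refine List.map_congr_left ?_
        intro r _
        cases r <;> rfl
      · refine List.map_congr_left ?_
        intro j _
        simp only [Function.comp]
        exact List.map_congr_left (fun r _ => pvTailGetD r j)

theorem mem_foldl_add2If (p q : List Int → Prop) [DecidablePred p] [DecidablePred q]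
    (l : List (List Int)) (s : List (List Int)) (y : List Int) :
    y ∈ l.foldl (fun s x => if p x then PySem.Set.add s x
                            else if q x then PySem.Set.add s x else s) s ↔
      y ∈ s ∨ (y ∈ l ∧ (p y ∨ q y)) := by
  induction l generalizing s with
  | nil => simp
  | cons x xs ih =>
      simp only [List.foldl_cons, ih, List.mem_cons]
      by_cases hp : p x
      · rw [if_pos hp, PySem.Set.mem_add]
        constructor
        · rintro ((hy | rfl) | h)
          · exact Or.inl hy
          · exact Or.inr ⟨Or.inl rfl, Or.inl hp⟩
          · exact Or.inr ⟨Or.inr h.1, h.2⟩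
        · rintro (hy | ⟨rfl | hmem, hpy⟩)
          · exact Or.inl (Or.inl hy)
          · exact Or.inl (Or.inr rfl)
          · exact Or.inr ⟨hmem, hpy⟩
      · rw [if_neg hp]
        by_cases hq : q x
        · rw [if_pos hq, PySem.Set.mem_add]
          constructor
          · rintro ((hy | rfl) | h)
            · exact Or.inl hy
            · exact Or.inr ⟨Or.inl rfl, Or.inr hq⟩
            · exact Or.inr ⟨Or.inr h.1, h.2⟩
          · rintro (hy | ⟨rfl | hmem, hpy⟩)
            · exact Or.inl (Or.inl hy)
            · exact Or.inl (Or.inr rfl)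
            · exact Or.inr ⟨hmem, hpy⟩
        · rw [if_neg hq]
          constructor
          · rintro (hy | h)
            · exact Or.inl hy
            · exact Or.inr ⟨Or.inr h.1, h.2⟩
          · rintro (hy | ⟨rfl | hmem, hpy⟩)
            · exact Or.inl hy
            · exact absurd hpy (by simp [hp, hq])
            · exact Or.inr ⟨hmem, hpy⟩

theorem nodup_foldl_add2If (p q : List Int → Prop) [DecidablePred p] [DecidablePred q]
    (l : List (List Int)) (s : List (List Int)) (hs : s.Nodup) :
    (l.foldl (fun s x => if p x then PySem.Set.add s x
                         else if q x then PySem.Set.add s x else s) s).Nodup := by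
  induction l generalizing s with
  | nil => exact hs
  | cons x xs ih =>
      rw [List.foldl_cons]
      by_cases hp : p x
      · rw [if_pos hp]; exact ih _ (PySem.Set.nodup_add s x hs)
      · rw [if_neg hp]
        by_cases hq : q x
        · rw [if_pos hq]; exact ih _ (PySem.Set.nodup_add s x hs)
        · rw [if_neg hq]; exact ih _ hs

-- score as a countP
theorem scoreA_eq (active : List (List Int)) (pos : List Int) :
    (PySem.Set.inter active (PySem.Set.ofList (neighborsA pos))).length
      = active.countP (fun r => decide (r ∈ neighborsA pos)) := by
  show (List.filter (fun x => (PySem.Set.ofList (neighborsA pos)).contains x) active).length = _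
  rw [← List.countP_eq_length_filter]
  refine List.countP_congr ?_
  intro x _
  simp [PySem.Set.mem_ofList]

theorem mem_stepA (active : List (List Int)) (pos : List Int) :
    pos ∈ stepA active ↔
      pos ∈ boundingBoxA active ∧
        ((pos ∈ active ∧ (active.countP (fun r => decide (r ∈ neighborsA pos)) = 2 ∨
                          active.countP (fun r => decide (r ∈ neighborsA pos)) = 3)) ∨
         active.countP (fun r => decide (r ∈ neighborsA pos)) = 3) := by
  unfold stepA
  rw [mem_foldl_add2If
    (fun x => x ∈ active ∧
      ((PySem.Set.inter active (PySem.Set.ofList (neighborsA x))).length = 2 ∨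
       (PySem.Set.inter active (PySem.Set.ofList (neighborsA x))).length = 3))
    (fun x => (PySem.Set.inter active (PySem.Set.ofList (neighborsA x))).length = 3)]
  simp only [scoreA_eq]
  constructor
  · rintro (h | h)
    · exact absurd h (List.not_mem_nil)
    · exact ⟨h.1, by tauto⟩
  · rintro ⟨hb, hc⟩
    exact Or.inr ⟨hb, by tauto⟩

theorem nodup_stepA (active : List (List Int)) : (stepA active).Nodup := by
  unfold stepA
  exact nodup_foldl_add2If _ _ _ _ List.nodup_nil

theorem pvFoldlFoldl (l : List (List Int)) (d : PySem.Dict (List Int) Int) :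
    l.foldl (fun d cell => (adjacentB cell).foldl (fun d nb => d.insert nb (d.getD nb 0 + 1)) d) d
      = (l.flatMap adjacentB).foldl (fun d nb => d.insert nb (d.getD nb 0 + 1)) d := by
  induction l generalizing d with
  | nil => simp
  | cons c cs ih => simp [List.flatMap_cons, List.foldl_append, ih]

theorem nested_foldl_counter (cells : List (List Int)) :
    cells.foldl
      (fun d cell => (adjacentB cell).foldl (fun d nb => d.insert nb (d.getD nb 0 + 1)) d)
      PySem.Dict.empty
      = PySem.Dict.counter (cells.flatMap adjacentB) := by
  rw [pvFoldlFoldl, PySem.Dict.foldl_insert_getD_add_one_eq_counter]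

theorem count_flatMap_adjacentB (T : List (List Int)) (pos : List Int) :
    (T.flatMap adjacentB).count pos = T.countP (fun c => decide (pos ∈ adjacentB c)) := by
  induction T with
  | nil => simp
  | cons c cs ih =>
      rw [List.flatMap_cons, List.count_append, List.countP_cons, ih]
      have hnd : (adjacentB c).Nodup := List.Nodup.filter _ (nodup_cubeB c)
      by_cases hmem : pos ∈ adjacentB c
      · rw [List.count_eq_one_of_mem hnd hmem]
        simp [hmem]
        omega
      · rw [List.count_eq_zero_of_not_mem hmem]
        simp [hmem]

theorem mem_stepB (T : List (List Int)) (pos : List Int) :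
    pos ∈ stepB T ↔
      pos ∈ T.flatMap adjacentB ∧
        (T.countP (fun c => decide (pos ∈ adjacentB c)) = 3 ∨
         (T.countP (fun c => decide (pos ∈ adjacentB c)) = 2 ∧ pos ∈ T)) := by
  unfold stepB
  simp only []
  rw [nested_foldl_counter T, PySem.Dict.items_counter, List.filter_map]
  simp only [PySem.Set.mem_ofList, List.mem_map, List.mem_filter, Function.comp,
    Bool.or_eq_true, Bool.and_eq_true, beq_iff_eq]
  have hcnt := count_flatMap_adjacentB T pos
  constructor
  · rintro ⟨a, ⟨k, ⟨hk, hcond⟩, rfl⟩, hfst⟩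
    simp only at hfst
    subst hfst
    refine ⟨hk, ?_⟩
    rcases hcond with h3 | ⟨h2, hmemT⟩
    · left
      have h3' : (T.flatMap adjacentB).count k = 3 := by exact_mod_cast h3
      have hck := count_flatMap_adjacentB T k
      omega
    · right
      have h2' : (T.flatMap adjacentB).count k = 2 := by exact_mod_cast h2
      have hck := count_flatMap_adjacentB T k
      exact ⟨by omega, by simpa using hmemT⟩
  · rintro ⟨hflat, hcond⟩
    refine ⟨(pos, ((T.flatMap adjacentB).count pos : Int)), ⟨pos, ⟨hflat, ?_⟩, rfl⟩, rfl⟩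
    rcases hcond with h3 | ⟨h2, hmemT⟩
    · left
      have : (T.flatMap adjacentB).count pos = 3 := by omega
      exact_mod_cast this
    · right
      refine ⟨?_, by simpa using hmemT⟩
      have : (T.flatMap adjacentB).count pos = 2 := by omega
      exact_mod_cast this

theorem nodup_stepB (T : List (List Int)) : (stepB T).Nodup := by
  unfold stepB
  exact PySem.Set.nodup_ofList _

-- transfer of a countP between two nodup lists whose members agree where p holds
theorem countP_transfer (S T : List (List Int)) (p : List Int → Bool)
    (hS : S.Nodup) (hT : T.Nodup)
    (h : ∀ x, (x ∈ S ∧ p x = true) ↔ (x ∈ T ∧ p x = true)) :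
    S.countP p = T.countP p := by
  rw [List.countP_eq_length_filter, List.countP_eq_length_filter]
  refine List.Perm.length_eq ?_
  refine (List.perm_ext_iff_of_nodup (List.Nodup.filter _ hS) (List.Nodup.filter _ hT)).2 ?_
  intro a
  simp only [List.mem_filter]
  exact ⟨fun hx => (h a).1 hx, fun hx => (h a).2 hx⟩

def pvGood (m : Nat) (S T : List (List Int)) : Prop :=
  S.Nodup ∧ T.Nodup ∧ (∀ x, x ∈ T ↔ x ∈ S ∧ x.length = m) ∧
    (∀ r ∈ S, m ≤ r.length) ∧ (S ≠ [] → ∃ r ∈ S, r.length = m)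

theorem stepA_nil : stepA [] = [] := by
  have hz : zipStar [] = [] := by rw [zipStar.eq_def]; simp
  simp [stepA, boundingBoxA, hz, prodA, PySem.Set.inter, PySem.Set.empty]

theorem stepB_nil : stepB [] = [] := by
  rfl

theorem pvStep (m : Nat) (S T : List (List Int)) (hg : pvGood m S T) :
    pvGood m (stepA S) (stepB T) ∧ (∀ r ∈ stepA S, r.length = m) := by
  obtain ⟨hSnd, hTnd, hTm, hml, hex⟩ := hg
  by_cases hS : S = []
  · subst hS
    have hT : T = [] := by
      rw [List.eq_nil_iff_forall_not_mem]
      intro x hx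
      exact List.not_mem_nil (((hTm x).1 hx).1)
    subst hT
    rw [stepA_nil, stepB_nil]
    exact ⟨⟨List.nodup_nil, List.nodup_nil, by simp, by simp, fun h => absurd rfl h⟩, by simp⟩
  · obtain ⟨r0, hr0, hr0len⟩ := hex hS
    have hzip := zipStar_eq m S hS hml ⟨r0, hr0, hr0len⟩
    have hbox : ∀ pos : List Int, pos ∈ boundingBoxA S ↔
        List.Forall₂ (fun (j : Nat) (v : Int) =>
          (PySem.List.min? (S.map (fun r => r.getD j 0)) (fun y => y)).getD 0 - 1 ≤ v ∧
            v < (PySem.List.max? (S.map (fun r => r.getD j 0)) (fun y => y)).getD 0 + 2)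
          (List.range m) pos := by
      intro pos
      unfold boundingBoxA
      rw [hzip, List.map_map, mem_prodA, List.forall₂_map_left_iff]
      have hiff : ∀ (j : Nat) (v : Int),
          (v ∈ ((fun ax => PySem.List.pyRange ((PySem.List.min? ax (fun y => y)).getD 0 - 1)
                ((PySem.List.max? ax (fun y => y)).getD 0 + 2) 1) ∘
                (fun j => S.map (fun r => r.getD j 0))) j) ↔
          ((PySem.List.min? (S.map (fun r => r.getD j 0)) (fun y => y)).getD 0 - 1 ≤ v ∧
            v < (PySem.List.max? (S.map (fun r => r.getD j 0)) (fun y => y)).getD 0 + 2) := by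
        intro j v
        simp [Function.comp, PySem.List.mem_pyRange_one]
      constructor
      · exact fun hf => hf.imp (fun _ _ h => (hiff _ _).1 h)
      · exact fun hf => hf.imp (fun _ _ h => (hiff _ _).2 h)
    have hboxlen : ∀ pos : List Int, pos ∈ boundingBoxA S → pos.length = m := by
      intro pos hp
      have := ((hbox pos).1 hp).length_eq
      simpa using this.symm
    have hlenTm : ∀ c ∈ T, c.length = m := fun c hc => ((hTm c).1 hc).2
    have hTS : ∀ c ∈ T, c ∈ S := fun c hc => ((hTm c).1 hc).1
    have hscore : ∀ pos : List Int, pos.length = m →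
        S.countP (fun r => decide (r ∈ neighborsA pos)) =
          T.countP (fun c => decide (pos ∈ adjacentB c)) := by
      intro pos hlen
      have h1 : S.countP (fun r => decide (r ∈ neighborsA pos)) =
          T.countP (fun r => decide (r ∈ neighborsA pos)) := by
        refine countP_transfer S T _ hSnd hTnd ?_
        intro x
        simp only [decide_eq_true_eq]
        constructor
        · rintro ⟨hxS, hxn⟩
          have hleq := ((mem_neighborsA pos x).1 hxn).1.length_eq
          exact ⟨(hTm x).2 ⟨hxS, by omega⟩, hxn⟩
        · rintro ⟨hxT, hxn⟩
          exact ⟨hTS x hxT, hxn⟩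
      rw [h1]
      refine List.countP_congr ?_
      intro c _
      simp only [decide_eq_true_eq]
      rw [mem_neighborsA, mem_adjacentB, pvNear_symm]
      constructor
      · rintro ⟨hf, hne⟩
        exact ⟨hf, fun h => hne h.symm⟩
      · rintro ⟨hf, hne⟩
        exact ⟨hf, fun h => hne h.symm⟩
    have hflat : ∀ pos : List Int, pos ∈ T.flatMap adjacentB ↔
        (pos.length = m ∧ 0 < T.countP (fun c => decide (pos ∈ adjacentB c))) := by
      intro pos
      rw [List.mem_flatMap]
      constructor
      · rintro ⟨c, hcT, hadj⟩
        have hclen := hlenTm c hcT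
        have hleq := ((mem_adjacentB c pos).1 hadj).1.length_eq
        refine ⟨by omega, ?_⟩
        exact List.countP_pos_iff.2 ⟨c, hcT, by simpa using hadj⟩
      · rintro ⟨-, hpos⟩
        obtain ⟨c, hcT, hc⟩ := List.countP_pos_iff.1 hpos
        exact ⟨c, hcT, by simpa using hc⟩
    have hflatbox : ∀ pos : List Int, pos ∈ T.flatMap adjacentB → pos ∈ boundingBoxA S := by
      intro pos hp
      obtain ⟨c, hcT, hadj⟩ := List.mem_flatMap.1 hp
      have hclen := hlenTm c hcT
      have hfar : List.Forall₂ pvNear c pos := ((mem_adjacentB c pos).1 hadj).1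
      have hlen := hfar.length_eq
      rw [hbox, List.forall₂_iff_get]
      refine ⟨by simpa using (show m = pos.length by omega), ?_⟩
      intro i h1 h2
      have hi : i < m := by simpa using h1
      have hgi : (List.range m).get ⟨i, h1⟩ = i := by simp
      rw [hgi]
      have hnear : pvNear (c.get ⟨i, by omega⟩) (pos.get ⟨i, h2⟩) :=
        (List.forall₂_iff_get.1 hfar).2 i (by omega) h2
      have hcget : c.get ⟨i, by omega⟩ = c.getD i 0 := by
        rw [List.getD_eq_getElem c 0 (by omega)]
        rfl
      have hcol : c.getD i 0 ∈ S.map (fun r => r.getD i 0) :=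
        List.mem_map_of_mem (hTS c hcT)
      obtain ⟨mn, hmn⟩ : ∃ mn, PySem.List.min? (S.map (fun r => r.getD i 0)) (fun y => y) = some mn := by
        cases hmin : PySem.List.min? (S.map (fun r => r.getD i 0)) (fun y => y) with
        | none =>
            have h0 := (PySem.List.min?_eq_none_iff _ _).1 hmin
            rw [List.map_eq_nil_iff] at h0
            exact absurd h0 hS
        | some mn => exact ⟨mn, rfl⟩
      obtain ⟨mx, hmx⟩ : ∃ mx, PySem.List.max? (S.map (fun r => r.getD i 0)) (fun y => y) = some mx := by
        cases hmax : PySem.List.max? (S.map (fun r => r.getD i 0)) (fun y => y) with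
        | none =>
            have h0 := (PySem.List.max?_eq_none_iff _ _).1 hmax
            rw [List.map_eq_nil_iff] at h0
            exact absurd h0 hS
        | some mx => exact ⟨mx, rfl⟩
      have hmnle : mn ≤ c.getD i 0 := by simpa using PySem.List.min?_isMin hmn _ hcol
      have hmxge : c.getD i 0 ≤ mx := by simpa using PySem.List.max?_isMax hmx _ hcol
      rw [hmn, hmx]
      simp only [Option.getD_some]
      unfold pvNear at hnear
      rw [hcget] at hnear
      rcases hnear with h | h | h <;> constructor <;> omega
    have hmain : ∀ pos : List Int, pos ∈ stepB T ↔ (pos ∈ stepA S ∧ pos.length = m) := by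
      intro pos
      rw [mem_stepA, mem_stepB]
      constructor
      · rintro ⟨hfl, hcond⟩
        have hlen : pos.length = m := ((hflat pos).1 hfl).1
        have hsc := hscore pos hlen
        refine ⟨⟨hflatbox pos hfl, ?_⟩, hlen⟩
        rcases hcond with h3 | ⟨h2, hpT⟩
        · exact Or.inr (by omega)
        · exact Or.inl ⟨((hTm pos).1 hpT).1, Or.inl (by omega)⟩
      · rintro ⟨⟨hb, hcond⟩, hlen⟩
        have hsc := hscore pos hlen
        rcases hcond with ⟨hpS, h23⟩ | h3
        · rcases h23 with h2 | h3'
          · exact ⟨(hflat pos).2 ⟨hlen, by omega⟩, Or.inr ⟨by omega, (hTm pos).2 ⟨hpS, hlen⟩⟩⟩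
          · exact ⟨(hflat pos).2 ⟨hlen, by omega⟩, Or.inl (by omega)⟩
        · exact ⟨(hflat pos).2 ⟨hlen, by omega⟩, Or.inl (by omega)⟩
    have hstepAlen : ∀ r ∈ stepA S, r.length = m :=
      fun r hr => hboxlen r (((mem_stepA S r).1 hr).1)
    refine ⟨⟨nodup_stepA S, nodup_stepB T, hmain, ?_, ?_⟩, hstepAlen⟩
    · intro r hr
      exact le_of_eq (hstepAlen r hr).symm
    · intro hne'
      obtain ⟨r, hr⟩ := List.exists_mem_of_ne_nil _ hne'
      exact ⟨r, hr, hstepAlen r hr⟩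

theorem pvFinal (m : Nat) (S T : List (List Int)) (hg : pvGood m S T)
    (hlen : ∀ r ∈ S, r.length = m) : S.length = T.length := by
  obtain ⟨hSnd, hTnd, hTm, -, -⟩ := hg
  have hperm : T.Perm S := by
    refine (List.perm_ext_iff_of_nodup hTnd hSnd).2 ?_
    intro a
    rw [hTm a]
    exact ⟨fun h => h.1, fun h => ⟨h, hlen a h⟩⟩
  exact hperm.length_eq.symm

-- Pre_'s adjacency predicate coincides with membership in B's neighbour list
theorem pvAdjB_iff (d p : List Int) :
    pvAdjB d p = true ↔ (List.Forall₂ pvNear d p ∧ p ≠ d) := by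
  unfold pvAdjB
  simp only [Bool.and_eq_true, beq_iff_eq, bne_iff_ne, ne_eq, List.all_eq_true, List.mem_range,
    decide_eq_true_eq]
  rw [List.forall₂_iff_get]
  constructor
  · rintro ⟨⟨hlen, hne⟩, hall⟩
    refine ⟨⟨hlen, ?_⟩, fun h => hne h.symm⟩
    intro i h1 h2
    have hb := hall i h1
    rw [List.getD_eq_getElem d 0 h1, List.getD_eq_getElem p 0 h2] at hb
    unfold pvNear
    simp only [List.get_eq_getElem]
    omega
  · rintro ⟨⟨hlen, hget⟩, hne⟩
    refine ⟨⟨hlen, fun h => hne h.symm⟩, ?_⟩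
    intro i hi
    have h2 : i < p.length := by omega
    have hb := hget i hi h2
    unfold pvNear at hb
    simp only [List.get_eq_getElem] at hb
    rw [List.getD_eq_getElem d 0 hi, List.getD_eq_getElem p 0 h2]
    omega

theorem countP_adjB (active : List (List Int)) (pos : List Int) :
    active.countP (fun d => pvAdjB d pos) = active.countP (fun c => decide (pos ∈ adjacentB c)) := by
  refine List.countP_congr ?_
  intro c _
  by_cases hm : pos ∈ adjacentB c
  · simp [hm, (pvAdjB_iff c pos).2 ((mem_adjacentB c pos).1 hm)]
  · have hf : ¬ (pvAdjB c pos = true) := fun ht => hm ((mem_adjacentB c pos).2 ((pvAdjB_iff c pos).1 ht))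
    rw [Bool.not_eq_true] at hf
    simp [hm, hf]

-- three cells adjacent to a common position have coordinatewise spread ≤ 2
theorem pvClose3_of_near (c1 c2 c3 pos : List Int)
    (h1 : List.Forall₂ pvNear c1 pos) (h2 : List.Forall₂ pvNear c2 pos)
    (h3 : List.Forall₂ pvNear c3 pos) : pvClose3 c1 c2 c3 = true := by
  unfold pvClose3
  rw [List.all_eq_true]
  intro j hj
  rw [List.mem_range] at hj
  have l1 := h1.length_eq
  have l2 := h2.length_eq
  have l3 := h3.length_eq
  have hp : j < pos.length := by omega
  have g1 := (List.forall₂_iff_get.1 h1).2 j hj hp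
  have g2 := (List.forall₂_iff_get.1 h2).2 j (by omega) hp
  have g3 := (List.forall₂_iff_get.1 h3).2 j (by omega) hp
  unfold pvNear at g1 g2 g3
  simp only [List.get_eq_getElem] at g1 g2 g3
  rw [decide_eq_true_eq, List.getD_eq_getElem c1 0 hj, List.getD_eq_getElem c2 0 (by omega),
    List.getD_eq_getElem c3 0 (by omega)]
  omega

-- stepB membership only depends on the membership of its argument (for Nodup lists)
theorem stepB_ext (T1 T2 : List (List Int)) (h1 : T1.Nodup) (h2 : T2.Nodup)
    (h : ∀ x, x ∈ T1 ↔ x ∈ T2) (pos : List Int) :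
    pos ∈ stepB T1 ↔ pos ∈ stepB T2 := by
  rw [mem_stepB, mem_stepB]
  have hc : T1.countP (fun c => decide (pos ∈ adjacentB c))
      = T2.countP (fun c => decide (pos ∈ adjacentB c)) := by
    refine countP_transfer T1 T2 _ h1 h2 ?_
    intro x
    rw [h x]
  have hf : pos ∈ T1.flatMap adjacentB ↔ pos ∈ T2.flatMap adjacentB := by
    rw [List.mem_flatMap, List.mem_flatMap]
    constructor
    · rintro ⟨c, hc', ha⟩; exact ⟨c, (h c).1 hc', ha⟩
    · rintro ⟨c, hc', ha⟩; exact ⟨c, (h c).2 hc', ha⟩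
  rw [hc, hf, h pos]

-- under Pre_'s doom clauses, a step on the full (mixed-dimension) set has the same members
-- as a step on the minimal-dimension cells alone
theorem stepB_mixed (active : List (List Int)) (mv : Int)
    (hnd : active.Nodup)
    (hmv : PySem.List.min? (active.map (fun c => (c.length : Int))) (fun y => y) = some mv)
    (hpair : ∀ c ∈ active, (c.length : Int) ≠ pvMinLenI active →
      active.countP (fun d => pvAdjB d c) < 2)
    (htriple : ∀ c1 ∈ active, ∀ c2 ∈ active, ∀ c3 ∈ active,
      (c1.length : Int) ≠ pvMinLenI active → c1 ≠ c2 → c1 ≠ c3 → c2 ≠ c3 →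
      c1.length = c2.length → c1.length = c3.length → ¬ pvClose3 c1 c2 c3 = true)
    (pos : List Int) :
    pos ∈ stepB active ↔ pos ∈ stepB (active.filter (fun c => (c.length : Int) == mv)) := by
  have hmvI : pvMinLenI active = mv := by
    unfold pvMinLenI
    rw [hmv]
    rfl
  have hlenadj : ∀ c : List Int, pos ∈ adjacentB c → c.length = pos.length := by
    intro c ha
    exact ((mem_adjacentB c pos).1 ha).1.length_eq
  by_cases hpl : (pos.length : Int) = mv
  · -- lengths match: counts, flatMap membership and set membership all transfer to the filter
    rw [mem_stepB, mem_stepB]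
    have hc : active.countP (fun c => decide (pos ∈ adjacentB c))
        = (active.filter (fun c => (c.length : Int) == mv)).countP
            (fun c => decide (pos ∈ adjacentB c)) := by
      refine countP_transfer _ _ _ hnd (List.Nodup.filter _ hnd) ?_
      intro x
      simp only [List.mem_filter, decide_eq_true_eq, beq_iff_eq]
      constructor
      · rintro ⟨hx, ha⟩
        exact ⟨⟨hx, by rw [hlenadj x ha, hpl]⟩, ha⟩
      · rintro ⟨⟨hx, -⟩, ha⟩
        exact ⟨hx, ha⟩
    have hf : pos ∈ active.flatMap adjacentB ↔
        pos ∈ (active.filter (fun c => (c.length : Int) == mv)).flatMap adjacentB := by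
      rw [List.mem_flatMap, List.mem_flatMap]
      constructor
      · rintro ⟨c, hc', ha⟩
        exact ⟨c, List.mem_filter.2 ⟨hc', by simp [hlenadj c ha, hpl]⟩, ha⟩
      · rintro ⟨c, hc', ha⟩
        exact ⟨c, (List.mem_filter.1 hc').1, ha⟩
    have hm : pos ∈ active ↔ pos ∈ active.filter (fun c => (c.length : Int) == mv) := by
      rw [List.mem_filter]
      exact ⟨fun hx => ⟨hx, by simp [hpl]⟩, fun hx => hx.1⟩
    rw [hc, hf, hm]
  · -- lengths differ from the minimum: both sides are empty of such positions
    constructor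
    · intro hmem
      obtain ⟨hfl, hcond⟩ := (mem_stepB active pos).1 hmem
      rcases hcond with h3 | ⟨h2, hposA⟩
      · -- a birth needs three distinct adjacent active cells: violates the triple clause
        have hflen : (active.filter (fun c => decide (pos ∈ adjacentB c))).length = 3 := by
          rw [← List.countP_eq_length_filter]
          exact h3
        have hnodF : (active.filter (fun c => decide (pos ∈ adjacentB c))).Nodup :=
          List.Nodup.filter _ hnd
        obtain ⟨a, b, c, hEq⟩ := List.length_eq_three.1 hflen
        rw [hEq] at hnodF
        have hmemF : ∀ x ∈ [a, b, c], x ∈ active ∧ pos ∈ adjacentB x := by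
          intro x hx
          have hx' : x ∈ active.filter (fun c => decide (pos ∈ adjacentB c)) := by
            rw [hEq]
            exact hx
          have h' := List.mem_filter.1 hx'
          exact ⟨h'.1, by simpa using h'.2⟩
        obtain ⟨haA, haAdj⟩ := hmemF a (by simp)
        obtain ⟨hbA, hbAdj⟩ := hmemF b (by simp)
        obtain ⟨hcA, hcAdj⟩ := hmemF c (by simp)
        have hdist : a ≠ b ∧ a ≠ c ∧ b ≠ c := by
          simp only [List.nodup_cons, List.mem_cons, List.not_mem_nil, or_false,
            not_or, List.nodup_nil, and_true] at hnodF
          tauto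
        have hlen_a := hlenadj a haAdj
        have hlen_b := hlenadj b hbAdj
        have hlen_c := hlenadj c hcAdj
        have hfalse : False :=
          htriple a haA b hbA c hcA (by rw [hmvI, hlen_a]; exact hpl)
            hdist.1 hdist.2.1 hdist.2.2 (by omega) (by omega)
            (pvClose3_of_near a b c pos ((mem_adjacentB a pos).1 haAdj).1
              ((mem_adjacentB b pos).1 hbAdj).1 ((mem_adjacentB c pos).1 hcAdj).1)
        exact hfalse.elim
      · -- a survival needs the cell itself plus two adjacent cells: violates the pair clause
        have hlt := hpair pos hposA (by rw [hmvI]; exact hpl)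
        rw [countP_adjB] at hlt
        omega
    · intro hmem
      obtain ⟨hfl, -⟩ :=
        (mem_stepB (active.filter (fun c => (c.length : Int) == mv)) pos).1 hmem
      obtain ⟨c, hcF, hadj⟩ := List.mem_flatMap.1 hfl
      have hcv := (List.mem_filter.1 hcF).2
      rw [beq_iff_eq] at hcv
      exact absurd (by rw [← hlenadj c hadj]; exact hcv) hpl

-- ===== VERDICT (by name: the statement is the Claim_ definition above) =====
theorem solve_spec : Claim_equal_solve := by
  intro active hdom hpre
  obtain ⟨hnd, hpair, htriple⟩ := hpre
  unfold Spec_solve solve solve_alt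
  rw [show List.range 6 = [0, 1, 2, 3, 4, 5] from rfl]
  simp only [List.foldl_cons, List.foldl_nil]
  by_cases hS : active = []
  · subst hS
    have hemp : PySem.Set.ofList ([] : List (List Int)) = [] := rfl
    simp [hemp, stepA_nil, stepB_nil]
  · obtain ⟨mv, hmv⟩ : ∃ mv,
        PySem.List.min? (active.map (fun c => (c.length : Int))) (fun y => y) = some mv := by
      cases h : PySem.List.min? (active.map (fun c => (c.length : Int))) (fun y => y) with
      | none =>
          have h0 := (PySem.List.min?_eq_none_iff _ _).1 h
          rw [List.map_eq_nil_iff] at h0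
          exact absurd h0 hS
      | some mv => exact ⟨mv, rfl⟩
    obtain ⟨r0, hr0, hr0v⟩ := List.mem_map.1 (PySem.List.min?_mem hmv)
    have hr0v' : (r0.length : Int) = mv := hr0v
    have hgood : pvGood mv.toNat active (active.filter (fun c => (c.length : Int) == mv)) := by
      refine ⟨hnd, List.Nodup.filter _ hnd, ?_, ?_, ?_⟩
      · intro x
        rw [List.mem_filter]
        simp only [beq_iff_eq]
        constructor
        · rintro ⟨hx, hxe⟩
          exact ⟨hx, by omega⟩
        · rintro ⟨hx, hxe⟩
          exact ⟨hx, by omega⟩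
      · intro r hr
        have h2 : mv ≤ (r.length : Int) := by
          simpa using PySem.List.min?_isMin hmv _ (List.mem_map_of_mem hr)
        omega
      · intro _
        exact ⟨r0, hr0, by omega⟩
    obtain ⟨hg1, hl1⟩ := pvStep _ _ _ hgood
    -- replace the filtered first step by B's actual first step (same members)
    have hg1' : pvGood mv.toNat (stepA active) (stepB (PySem.Set.ofList active)) := by
      obtain ⟨ha1, hb1, hm1, hr1, he1⟩ := hg1
      refine ⟨ha1, nodup_stepB _, ?_, hr1, he1⟩
      intro x
      rw [stepB_ext (PySem.Set.ofList active) active (PySem.Set.nodup_ofList _) hnd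
            (fun y => PySem.Set.mem_ofList active y) x,
          stepB_mixed active mv hnd hmv hpair htriple x]
      exact hm1 x
    obtain ⟨hg2, hl2⟩ := pvStep _ _ _ hg1'
    obtain ⟨hg3, hl3⟩ := pvStep _ _ _ hg2
    obtain ⟨hg4, hl4⟩ := pvStep _ _ _ hg3
    obtain ⟨hg5, hl5⟩ := pvStep _ _ _ hg4
    obtain ⟨hg6, hl6⟩ := pvStep _ _ _ hg5
    have hfin := pvFinal _ _ _ hg6 hl6
    simp only [PySem.Set.len]
    rw [hfin]
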